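-- pv_equiv track=rewrite | github.com/ndvz-tb/homework-iot- | lab71.py | bubble_sort_columns
-- ===== SOURCE A (Python) =====
-- def bubble_sort_columns(matrix):
--     """
--     Сортує кожен стовпець матриці за зростанням методом обміну.
--     """
--     rows = len(matrix)
--     cols = len(matrix[0])
--
--     for col in range(cols):
--         for i in range(rows - 1):
--             for j in range(rows - 1 - i):
--                 if matrix[j][col] > matrix[j + 1][col]:
--                     matrix[j][col], matrix[j + 1][col] = matrix[j + 1][col], matrix[j][col]
--
--     return matrix
-- ===== SOURCE B (Python) =====
-- def bubble_sort_columns(matrix):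
--     """
--     Sorts each column ascending: extract the column, sort it with sorted(),
--     write it back in place. Same in-place mutation of the rows as A.
--     """
--     rows = len(matrix)
--     cols = len(matrix[0])
--
--     for col in range(cols):
--         column = sorted(matrix[i][col] for i in range(rows))
--         for i in range(rows):
--             matrix[i][col] = column[i]
--
--     return matrix
-- ===== Notes on version B (the rewrite author's own statement) =====
-- stated objective: faster
-- what changed: Replaces the per-column triple-nested bubble sort (O(rows^2) swaps per column) by extracting each column, sorting it once with built-in sorted(), and writing the values back in place.
import Mathlib
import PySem

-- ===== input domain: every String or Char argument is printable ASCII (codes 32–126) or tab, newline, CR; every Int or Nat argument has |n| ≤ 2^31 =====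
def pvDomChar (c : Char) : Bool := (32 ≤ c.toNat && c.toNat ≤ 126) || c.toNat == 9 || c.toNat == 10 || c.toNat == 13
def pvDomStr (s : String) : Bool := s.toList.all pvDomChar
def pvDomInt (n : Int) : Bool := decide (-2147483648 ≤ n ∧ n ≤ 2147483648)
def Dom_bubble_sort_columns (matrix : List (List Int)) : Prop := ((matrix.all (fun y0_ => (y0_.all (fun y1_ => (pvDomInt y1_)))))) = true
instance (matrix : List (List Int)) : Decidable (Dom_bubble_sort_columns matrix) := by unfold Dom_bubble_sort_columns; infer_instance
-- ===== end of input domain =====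

-- B replaces the per-column bubble sort by sorting each extracted column with sorted() and
-- writing it back; equivalence is about the RETURN value only — both Pythons also mutate
-- the argument's rows in place in the same way.

-- ===== PORT A =====
-- matrix[i][col] (indices in range under Pre_; the default 0 is unreached)
def pvMget (m : List (List Int)) (i col : Int) : Int :=
  PySem.List.pyGetD (PySem.List.pyGetD m i []) col 0

-- matrix[i][col] = v (indices produced by range(), hence nonnegative and in range under Pre_)
def pvMset (m : List (List Int)) (i col : Int) (v : Int) : List (List Int) :=
  m.set i.toNat ((m.getD i.toNat []).set col.toNat v)

-- body of A's innermost loop: compare-and-swap matrix[j][col], matrix[j+1][col]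
def pvSwapStep (col : Int) (m : List (List Int)) (j : Int) : List (List Int) :=
  if pvMget m j col > pvMget m (j + 1) col then
    pvMset (pvMset m j col (pvMget m (j + 1) col)) (j + 1) col (pvMget m j col)
  else m

def bubble_sort_columns (matrix : List (List Int)) : List (List Int) :=
  let rows : Int := matrix.length
  let cols : Int := ((PySem.List.pyGetD matrix 0 []).length : Int)
  (PySem.List.pyRange 0 cols 1).foldl (fun m col =>
    (PySem.List.pyRange 0 (rows - 1) 1).foldl (fun m i =>
      (PySem.List.pyRange 0 (rows - 1 - i) 1).foldl (pvSwapStep col) m) m) matrix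

-- ===== PORT B =====
def bubble_sort_columns_alt (matrix : List (List Int)) : List (List Int) :=
  let rows : Int := matrix.length
  let cols : Int := ((PySem.List.pyGetD matrix 0 []).length : Int)
  (PySem.List.pyRange 0 cols 1).foldl (fun m col =>
    let column := PySem.List.sorted
      ((PySem.List.pyRange 0 rows 1).map (fun i => pvMget m i col)) (fun x => x) false
    (PySem.List.pyRange 0 rows 1).foldl
      (fun m i => pvMset m i col (PySem.List.pyGetD column i 0)) m) matrix

-- ===== PRECONDITION & SPEC =====
-- A raises IndexError on the empty matrix (len(matrix[0])) and, when it has at least two rows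
-- and a nonempty first row, on any row shorter than the first; exactly those inputs are excluded.
def Pre_bubble_sort_columns (matrix : List (List Int)) : Prop :=
  matrix ≠ [] ∧ ∀ r ∈ matrix, (matrix.headD []).length ≤ r.length
instance (matrix : List (List Int)) : Decidable (Pre_bubble_sort_columns matrix) := by
  unfold Pre_bubble_sort_columns; infer_instance

def pvWitness_bubble_sort_columns : List (List Int) := [[3, 1], [1, 2]]

def Spec_bubble_sort_columns (matrix : List (List Int)) (out : List (List Int)) : Prop := out = bubble_sort_columns_alt matrix
instance (matrix : List (List Int)) (out : List (List Int)) : Decidable (Spec_bubble_sort_columns matrix out) := by unfold Spec_bubble_sort_columns; infer_instance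

-- ===== CLAIM (what is proved, stated in full; the proofs are below) =====
def Claim_equal_bubble_sort_columns : Prop := ∀ (matrix : List (List Int)), Dom_bubble_sort_columns matrix → Pre_bubble_sort_columns matrix → Spec_bubble_sort_columns matrix (bubble_sort_columns matrix)

-- ===== LEMMAS AND PROOFS =====

-- ---- pure column-level model of A's loops ----

-- compare-and-swap at positions j, j+1 of a plain list (the column shadow of pvSwapStep)
def cswap (ys : List Int) (j : Nat) : List Int :=
  if ys.getD j 0 > ys.getD (j + 1) 0 then
    (ys.set j (ys.getD (j + 1) 0)).set (j + 1) (ys.getD j 0)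
  else ys

-- one bubble pass limited to the first k compare-and-swaps, structurally
def bpassN : Nat → List Int → List Int
  | 0, ys => ys
  | k + 1, a :: b :: t => if a > b then b :: bpassN k (a :: t) else a :: bpassN k (b :: t)
  | _ + 1, ys => ys

-- the outer loop: passes with bounds k, k-1, …, 1
def bubA : Nat → List Int → List Int
  | 0, ys => ys
  | k + 1, ys => bubA k (bpassN (k + 1) ys)

-- column c of m / write list ys into column c of m
def colOf (m : List (List Int)) (c : Nat) : List Int := m.map (fun r => r.getD c 0)

def wcol (c : Nat) : List (List Int) → List Int → List (List Int)
  | [], _ => []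
  | r :: rs, ys => r.set c (ys.headD 0) :: wcol c rs ys.tail

-- ---- length bookkeeping ----

theorem length_bpassN (k : Nat) (ys : List Int) : (bpassN k ys).length = ys.length := by
  induction k generalizing ys with
  | zero => rfl
  | succ k ih =>
    match ys with
    | [] => rfl
    | [a] => rfl
    | a :: b :: t => simp only [bpassN]; split <;> simp [ih]

theorem length_cswap (ys : List Int) (j : Nat) : (cswap ys j).length = ys.length := by
  unfold cswap; split <;> simp

theorem length_foldl_cswap (l : List Nat) (ys : List Int) :
    (l.foldl cswap ys).length = ys.length := by
  induction l generalizing ys with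
  | nil => rfl
  | cons x l ih => simp [List.foldl_cons, ih, length_cswap]

theorem length_wcol (c : Nat) (m : List (List Int)) (ys : List Int) :
    (wcol c m ys).length = m.length := by
  induction m generalizing ys with
  | nil => rfl
  | cons r rs ih => simp [wcol, ih]

theorem wcol_row_lengths (c : Nat) (m : List (List Int)) (ys : List Int) :
    ∀ r' ∈ wcol c m ys, ∃ r ∈ m, r'.length = r.length := by
  induction m generalizing ys with
  | nil => intro r' h; simp [wcol] at h
  | cons r rs ih =>
    intro r' h
    simp only [wcol, List.mem_cons] at h
    rcases h with h | h
    · exact ⟨r, by simp, by simp [h]⟩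
    · obtain ⟨r0, hr0, hl⟩ := ih ys.tail r' h
      exact ⟨r0, by simp [hr0], hl⟩

-- ---- index fold = structural pass ----

theorem cswap_cons (a : Int) (l : List Int) (k : Nat) :
    cswap (a :: l) (k + 1) = a :: cswap l k := by
  unfold cswap
  simp
  split <;> rfl

theorem cswap_bpassN (k : Nat) (ys : List Int) (h : k + 2 ≤ ys.length) :
    cswap (bpassN k ys) k = bpassN (k + 1) ys := by
  induction k generalizing ys with
  | zero =>
    match ys, h with
    | a :: b :: t, _ =>
      simp only [bpassN, cswap, List.getD_cons_zero, List.getD_cons_succ]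
      split <;> simp [List.set_cons_zero, List.set_cons_succ]
  | succ k ih =>
    match ys, h with
    | a :: b :: t, h =>
      simp only [bpassN]
      split
      · rw [cswap_cons, ih (a :: t) (by simpa using h)]
      · rw [cswap_cons, ih (b :: t) (by simpa using h)]

theorem foldl_cswap_range (k : Nat) (ys : List Int) (h : k < ys.length) :
    (List.range k).foldl cswap ys = bpassN k ys := by
  induction k with
  | zero => rfl
  | succ k ih =>
    rw [List.range_succ, List.foldl_append, List.foldl_cons, List.foldl_nil,
      ih (Nat.lt_of_succ_lt h), cswap_bpassN k ys (by omega)]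

theorem foldl_bubA (m : Nat) (ys : List Int) (h : m < ys.length) :
    (List.range m).foldl (fun l i => (List.range (m - i)).foldl cswap l) ys = bubA m ys := by
  induction m generalizing ys with
  | zero => rfl
  | succ m ih =>
    rw [List.range_succ_eq_map, List.foldl_cons, List.foldl_map]
    have h1 : (List.range (m + 1 - 0)).foldl cswap ys = bpassN (m + 1) ys := by
      simpa using foldl_cswap_range (m + 1) ys (by omega)
    rw [h1]
    have hlen : (bpassN (m + 1) ys).length = ys.length := length_bpassN _ _
    have := ih (bpassN (m + 1) ys) (by omega)
    simpa [Nat.succ_sub_succ] using this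

-- ---- bubble sort sorts ----

theorem bpassN_append (k : Nat) (front back : List Int) (h : k < front.length) :
    bpassN k (front ++ back) = bpassN k front ++ back := by
  induction k generalizing front with
  | zero => rfl
  | succ k ih =>
    match front, h with
    | a :: b :: t, h =>
      simp only [List.cons_append, bpassN]
      have hk : k < (a :: t).length := by simp at h ⊢; omega
      split
      · have := ih (a :: t) hk; simpa [List.cons_append] using congrArg (b :: ·) this
      · have := ih (b :: t) (by simpa using hk); simpa [List.cons_append] using congrArg (a :: ·) this

theorem bpassN_bubble (t : List Int) : ∀ a : Int, ∃ l' x, bpassN t.length (a :: t) = l' ++ [x] ∧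
    (l' ++ [x]).Perm (a :: t) ∧ ∀ y ∈ l', y ≤ x := by
  induction t with
  | nil => exact fun a => ⟨[], a, rfl, List.Perm.refl _, by simp⟩
  | cons b t' ih =>
    intro a
    by_cases h : a > b
    · obtain ⟨l', x, he, hp, hbd⟩ := ih a
      have hax : a ≤ x := by
        have : a ∈ l' ++ [x] := hp.mem_iff.mpr (by simp)
        rcases List.mem_append.mp this with h' | h'
        · exact hbd a h'
        · simp at h'; omega
      refine ⟨b :: l', x, ?_, ?_, ?_⟩
      · simp only [List.length_cons, bpassN, if_pos h, he, List.cons_append]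
      · exact (List.Perm.cons b hp).trans (List.Perm.swap a b t')
      · intro y hy
        rcases List.mem_cons.mp hy with rfl | hy
        · omega
        · exact hbd y hy
    · obtain ⟨l', x, he, hp, hbd⟩ := ih b
      have hbx : b ≤ x := by
        have : b ∈ l' ++ [x] := hp.mem_iff.mpr (by simp)
        rcases List.mem_append.mp this with h' | h'
        · exact hbd b h'
        · simp at h'; omega
      refine ⟨a :: l', x, ?_, ?_, ?_⟩
      · simp only [List.length_cons, bpassN, if_neg h, he, List.cons_append]
      · exact List.Perm.cons a hp
      · intro y hy
        rcases List.mem_cons.mp hy with rfl | hy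
        · omega
        · exact hbd y hy

theorem bpassN_full (l : List Int) (h : l ≠ []) :
    ∃ l' x, bpassN (l.length - 1) l = l' ++ [x] ∧ (l' ++ [x]).Perm l ∧ ∀ y ∈ l', y ≤ x := by
  match l, h with
  | a :: t, _ => simpa using bpassN_bubble t a

theorem bubA_sorts (k : Nat) (front back : List Int) (hf : front.length = k + 1)
    (hb : back.Pairwise (· ≤ ·)) (hfb : ∀ a ∈ front, ∀ b ∈ back, a ≤ b) :
    (bubA k (front ++ back)).Perm (front ++ back) ∧
      (bubA k (front ++ back)).Pairwise (· ≤ ·) := by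
  induction k generalizing front back with
  | zero =>
    match front, hf with
    | [f], _ =>
      constructor
      · exact List.Perm.refl _
      · simp only [bubA, List.singleton_append, List.pairwise_cons]
        exact ⟨fun b hb' => hfb f (by simp) b hb', hb⟩
  | succ k ih =>
    have hff : front ≠ [] := by intro h; rw [h] at hf; simp at hf
    obtain ⟨l', x, he, hp, hbd⟩ := bpassN_full front hff
    have hfl : front.length - 1 = k + 1 := by omega
    rw [hfl] at he
    have hl' : l'.length = k + 1 := by
      have := hp.length_eq; simp at this; omega
    have hstep : bubA (k + 1) (front ++ back) = bubA k (l' ++ (x :: back)) := by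
      show bubA k (bpassN (k + 1) (front ++ back)) = _
      rw [bpassN_append (k + 1) front back (by omega), he]
      simp [List.append_assoc]
    have hxfront : x ∈ front := hp.mem_iff.mp (by simp)
    have hl'front : ∀ y ∈ l', y ∈ front := fun y hy => hp.mem_iff.mp (by simp [hy])
    have hb' : (x :: back).Pairwise (· ≤ ·) := by
      rw [List.pairwise_cons]
      exact ⟨fun b hb' => hfb x hxfront b hb', hb⟩
    have hfb' : ∀ a ∈ l', ∀ b ∈ x :: back, a ≤ b := by
      intro a ha b hbm
      rcases List.mem_cons.mp hbm with rfl | hbm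
      · exact hbd a ha
      · exact hfb a (hl'front a ha) b hbm
    obtain ⟨ihp, ihs⟩ := ih l' (x :: back) hl' hb' hfb'
    rw [hstep]
    refine ⟨ihp.trans ?_, ihs⟩
    have := hp.append_right back
    simpa using this

-- ---- matrix/column simulation ----

theorem wcol_colOf (c : Nat) (m : List (List Int)) (hc : ∀ r ∈ m, c < r.length) :
    wcol c m (colOf m c) = m := by
  induction m with
  | nil => rfl
  | cons r rs ih =>
    have hr : c < r.length := hc r (by simp)
    simp only [wcol, colOf, List.map_cons, List.headD_cons, List.tail_cons]
    rw [List.getD_eq_getElem r 0 hr, List.set_getElem_self]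
    rw [show (List.map (fun r => r.getD c 0) rs) = colOf rs c from rfl,
      ih (fun r' h => hc r' (by simp [h]))]

theorem gN_wcol (c : Nat) (m : List (List Int)) (ys : List Int) (i : Nat)
    (hl : ys.length = m.length) (hi : i < m.length) (hc : ∀ r ∈ m, c < r.length) :
    ((wcol c m ys).getD i []).getD c 0 = ys.getD i 0 := by
  induction m generalizing ys i with
  | nil => simp at hi
  | cons r rs ih =>
    match ys, hl with
    | y :: ys', hl =>
      match i with
      | 0 =>
        simp only [wcol, List.headD_cons, List.getD_cons_zero, List.tail_cons]
        have hr : c < r.length := hc r (by simp)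
        rw [List.getD_eq_getElem _ 0 (by simpa using hr), List.getElem_set_self]
      | i + 1 =>
        simp only [wcol, List.getD_cons_succ, List.tail_cons]
        exact ih ys' i (by simpa using hl) (by simpa using hi)
          (fun r' h => hc r' (by simp [h]))

theorem sN_wcol (c : Nat) (m : List (List Int)) (ys : List Int) (i : Nat) (v : Int)
    (hl : ys.length = m.length) :
    ((wcol c m ys).set i (((wcol c m ys).getD i []).set c v)) = wcol c m (ys.set i v) := by
  induction m generalizing ys i with
  | nil => simp [wcol]
  | cons r rs ih =>
    match ys, hl with
    | y :: ys', hl =>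
      match i with
      | 0 =>
        simp only [wcol, List.headD_cons, List.getD_cons_zero, List.tail_cons,
          List.set_cons_zero, List.set_set]
      | i + 1 =>
        simp only [wcol, List.headD_cons, List.getD_cons_succ, List.tail_cons,
          List.set_cons_succ]
        rw [ih ys' i (by simpa using hl)]

-- writing a whole list back, position by position, yields that list
theorem set_append_len (A : List Int) (xv : Int) (B : List Int) (v : Int) :
    ((A ++ xv :: B).set A.length v) = A ++ v :: B := by
  induction A with
  | nil => simp
  | cons a A ih => simp [List.set_cons_succ, ih]

theorem foldl_set_all (zs : List Int) (ys : List Int) (k : Nat)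
    (hl : ys.length = zs.length) (hk : k ≤ zs.length) :
    (List.range k).foldl (fun l i => l.set i (zs.getD i 0)) ys = zs.take k ++ ys.drop k := by
  induction k with
  | zero => simp
  | succ k ih =>
    rw [List.range_succ, List.foldl_append, List.foldl_cons, List.foldl_nil, ih (by omega)]
    have hky : k < ys.length := by omega
    have hkz : k < zs.length := by omega
    have hlen : (zs.take k).length = k := by simp; omega
    rw [List.drop_eq_getElem_cons hky]
    calc (zs.take k ++ ys[k] :: ys.drop (k + 1)).set k (zs.getD k 0)
        = (zs.take k ++ ys[k] :: ys.drop (k + 1)).set (zs.take k).length (zs.getD k 0) := by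
          rw [hlen]
      _ = zs.take k ++ zs.getD k 0 :: ys.drop (k + 1) := set_append_len _ _ _ _
      _ = zs.take (k + 1) ++ ys.drop (k + 1) := by
          have ht : zs.take (k + 1) = zs.take k ++ [zs[k]] := by
            rw [List.take_add_one]
            simp [List.getElem?_eq_getElem hkz]
          rw [List.getD_eq_getElem zs 0 hkz, ht, List.append_assoc]
          simp

-- ---- the per-column step functions agree ----

-- pvSwapStep at cast Nat indices, acting on a written column
theorem pvSwapStep_wcol (c : Nat) (m : List (List Int)) (ys : List Int) (j : Nat)
    (hl : ys.length = m.length) (hj : j + 1 < m.length) (hc : ∀ r ∈ m, c < r.length) :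
    pvSwapStep (c : Int) (wcol c m ys) (j : Int) = wcol c m (cswap ys j) := by
  have hget : ∀ (i : Nat), i < m.length →
      pvMget (wcol c m ys) (i : Int) (c : Int) = ys.getD i 0 := by
    intro i hi
    simp only [pvMget, PySem.List.pyGetD_natCast]
    exact gN_wcol c m ys i hl hi hc
  have hset : ∀ (i : Nat) (v : Int),
      pvMset (wcol c m ys) (i : Int) (c : Int) v = wcol c m (ys.set i v) := by
    intro i v
    simp only [pvMset, Int.toNat_natCast]
    exact sN_wcol c m ys i v hl
  have hcast : ((j : Int) + 1) = ((j + 1 : Nat) : Int) := by push_cast; ring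
  unfold pvSwapStep cswap
  rw [hcast, hget j (by omega), hget (j + 1) hj]
  split
  · rw [hset j]
    have hl2 : (ys.set j (ys.getD (j + 1) 0)).length = m.length := by simpa using hl
    have hget2 := gN_wcol c m (ys.set j (ys.getD (j + 1) 0))
    rw [show pvMset (wcol c m (ys.set j (ys.getD (j + 1) 0))) ((j + 1 : Nat) : Int) (c : Int)
          (ys.getD j 0) = wcol c m ((ys.set j (ys.getD (j + 1) 0)).set (j + 1) (ys.getD j 0)) by
      simp only [pvMset, Int.toNat_natCast]
      exact sN_wcol c m _ (j + 1) _ hl2]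
  · rfl

-- the inner j-fold simulated on the column
theorem inner_fold_wcol (c : Nat) (m : List (List Int)) (hc : ∀ r ∈ m, c < r.length)
    (l : List Nat) (hjl : ∀ j ∈ l, j + 1 < m.length) :
    ∀ ys, ys.length = m.length →
      l.foldl (fun mm (j : Nat) => pvSwapStep (c : Int) mm (j : Int)) (wcol c m ys)
        = wcol c m (l.foldl cswap ys) := by
  induction l with
  | nil => intro ys _; rfl
  | cons j l ih =>
    intro ys hl
    simp only [List.foldl_cons]
    rw [pvSwapStep_wcol c m ys j hl (hjl j (by simp)) hc]
    exact ih (fun j' h => hjl j' (by simp [h])) (cswap ys j) (by simpa [length_cswap] using hl)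

-- the outer i-fold simulated on the column
theorem outer_fold_wcol (c : Nat) (m : List (List Int)) (hc : ∀ r ∈ m, c < r.length)
    (n : Nat) (hn : m.length = n) (l : List Nat) :
    ∀ ys, ys.length = m.length →
      l.foldl (fun mm i =>
          (List.range (n - 1 - i)).foldl (fun mm (j : Nat) => pvSwapStep (c : Int) mm (j : Int)) mm)
        (wcol c m ys)
        = wcol c m (l.foldl (fun ys i => (List.range (n - 1 - i)).foldl cswap ys) ys) := by
  induction l with
  | nil => intro ys _; rfl
  | cons i l ih =>
    intro ys hl
    simp only [List.foldl_cons]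
    rw [inner_fold_wcol c m hc (List.range (n - 1 - i))
      (fun j hj => by simp at hj; omega) ys hl]
    exact ih _ (by simpa [length_foldl_cswap] using hl)

-- bubA of a column equals Python sorted of that column
theorem bubA_eq_sorted (ys : List Int) (h : ys ≠ []) :
    bubA (ys.length - 1) ys = PySem.List.sorted ys (fun x => x) false := by
  have hlen : ys.length = (ys.length - 1) + 1 := by
    cases ys with
    | nil => exact absurd rfl h
    | cons a t => simp
  obtain ⟨hpermA, hsort⟩ := bubA_sorts (ys.length - 1) ys [] hlen (by simp) (by simp)
  simp only [List.append_nil] at hpermA hsort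
  exact (PySem.List.sorted_id_eq_of_perm_of_pairwise _ _ hpermA hsort).symm

-- the write-back fold of B, simulated on the column
theorem write_fold_wcol (c : Nat) (m : List (List Int)) (zs : List Int) :
    ∀ (l : List Nat) (ys : List Int), ys.length = m.length →
      l.foldl (fun mm (i : Nat) => pvMset mm (i : Int) (c : Int) (PySem.List.pyGetD zs (i : Int) 0))
          (wcol c m ys)
        = wcol c m (l.foldl (fun ys i => ys.set i (zs.getD i 0)) ys) := by
  intro l
  induction l with
  | nil => intro ys _; rfl
  | cons i l ih =>
    intro ys hl
    simp only [List.foldl_cons]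
    have hstep : pvMset (wcol c m ys) (i : Int) (c : Int) (PySem.List.pyGetD zs (i : Int) 0)
        = wcol c m (ys.set i (zs.getD i 0)) := by
      simp only [pvMset, Int.toNat_natCast, PySem.List.pyGetD_natCast]
      exact sN_wcol c m ys i _ hl
    rw [hstep]
    exact ih _ (by simpa using hl)

-- A's per-column double loop, in closed column form
theorem col_step_A (n c : Nat) (m : List (List Int)) (hm : m.length = n) (hn : 1 ≤ n)
    (hc : ∀ r ∈ m, c < r.length) :
    (PySem.List.pyRange 0 ((n : Int) - 1) 1).foldl (fun mm i =>
        (PySem.List.pyRange 0 ((n : Int) - 1 - i) 1).foldl (pvSwapStep (c : Int)) mm) m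
      = wcol c m (bubA (n - 1) (colOf m c)) := by
  have hinner : ∀ (k : Nat) (mm : List (List Int)),
      (PySem.List.pyRange 0 ((n : Int) - 1 - ((0 : Int) + (k : Nat))) 1).foldl
          (pvSwapStep (c : Int)) mm
        = (List.range (n - 1 - k)).foldl
            (fun mm (j : Nat) => pvSwapStep (c : Int) mm (j : Int)) mm := by
    intro k mm
    rw [PySem.List.pyRange_one, List.foldl_map]
    have h2 : (((n : Int) - 1 - ((0 : Int) + (k : Nat))) - 0).toNat = n - 1 - k := by omega
    rw [h2]
    simp
  rw [PySem.List.pyRange_one, List.foldl_map]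
  have h1 : (((n : Int) - 1) - 0).toNat = n - 1 := by omega
  rw [h1]
  have hbody : (fun (mm : List (List Int)) (k : Nat) =>
      (PySem.List.pyRange 0 ((n : Int) - 1 - ((0 : Int) + (k : Nat))) 1).foldl
        (pvSwapStep (c : Int)) mm)
      = (fun (mm : List (List Int)) (k : Nat) => (List.range (n - 1 - k)).foldl
          (fun mm (j : Nat) => pvSwapStep (c : Int) mm (j : Int)) mm) :=
    funext fun mm => funext fun k => hinner k mm
  rw [hbody]
  conv_lhs => rw [← wcol_colOf c m hc]
  rw [outer_fold_wcol c m hc n hm (List.range (n - 1)) (colOf m c) (by simp [colOf])]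
  rw [foldl_bubA (n - 1) (colOf m c) (by simp [colOf]; omega)]

-- B's per-column extract-sort-write, in closed column form
theorem col_step_B (n c : Nat) (m : List (List Int)) (hm : m.length = n) (hn : 1 ≤ n)
    (hc : ∀ r ∈ m, c < r.length) :
    (PySem.List.pyRange 0 (n : Int) 1).foldl (fun mm i =>
        pvMset mm i (c : Int) (PySem.List.pyGetD
          (PySem.List.sorted ((PySem.List.pyRange 0 (n : Int) 1).map
            (fun i => pvMget m i (c : Int))) (fun x => x) false) i 0)) m
      = wcol c m (PySem.List.sorted (colOf m c) (fun x => x) false) := by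
  have hext : (PySem.List.pyRange 0 (n : Int) 1).map (fun i => pvMget m i (c : Int))
      = colOf m c := by
    have h0 : (PySem.List.pyRange 0 ((m.length : Nat) : Int) 1).map
        (fun i => PySem.List.pyGetD m i []) = m := PySem.List.map_pyGetD_pyRange_zero m []
    rw [hm] at h0
    calc (PySem.List.pyRange 0 (n : Int) 1).map (fun i => pvMget m i (c : Int))
        = ((PySem.List.pyRange 0 (n : Int) 1).map (fun i => PySem.List.pyGetD m i [])).map
            (fun r => PySem.List.pyGetD r (c : Int) 0) := by rw [List.map_map]; rfl
      _ = m.map (fun r => PySem.List.pyGetD r (c : Int) 0) := by rw [h0]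
      _ = colOf m c := by simp [colOf]
  rw [hext]
  rw [PySem.List.pyRange_one, List.foldl_map]
  have h1 : (((n : Int)) - 0).toNat = n := by omega
  rw [h1]
  simp only [zero_add]
  set zs := PySem.List.sorted (colOf m c) (fun x => x) false with hzs
  conv_lhs => rw [← wcol_colOf c m hc]
  rw [write_fold_wcol c m zs (List.range n) (colOf m c) (by simp [colOf])]
  have hlz : zs.length = n := by
    simp [hzs, PySem.List.length_sorted, colOf, hm]
  rw [foldl_set_all zs (colOf m c) n (by simp [colOf, hm, hlz]) (by omega)]
  rw [List.take_of_length_le (by omega), List.drop_eq_nil_of_le (by simp [colOf, hm]),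
    List.append_nil]

-- folding over the columns: A's body and B's body agree step by step
theorem cols_fold (n K : Nat) (hn : 1 ≤ n) :
    ∀ (l : List Int), (∀ col ∈ l, 0 ≤ col ∧ col < (K : Int)) →
    ∀ m : List (List Int), m.length = n → (∀ r ∈ m, K ≤ r.length) →
      l.foldl (fun mm col => (PySem.List.pyRange 0 ((n : Int) - 1) 1).foldl (fun mm i =>
          (PySem.List.pyRange 0 ((n : Int) - 1 - i) 1).foldl (pvSwapStep col) mm) mm) m
      = l.foldl (fun mm col =>
          (PySem.List.pyRange 0 (n : Int) 1).foldl (fun mm2 i =>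
            pvMset mm2 i col (PySem.List.pyGetD
              (PySem.List.sorted ((PySem.List.pyRange 0 (n : Int) 1).map
                (fun i => pvMget mm i col)) (fun x => x) false) i 0)) mm) m := by
  intro l
  induction l with
  | nil => intro _ m _ _; rfl
  | cons col l ih =>
    intro hmem m hm hK
    have h0 := (hmem col (by simp)).1
    have h1 := (hmem col (by simp)).2
    have hcol : col = (col.toNat : Int) := by omega
    have hclt : col.toNat < K := by omega
    have hcr : ∀ r ∈ m, col.toNat < r.length := fun r hr => lt_of_lt_of_le hclt (hK r hr)
    simp only [List.foldl_cons]
    rw [hcol, col_step_A n col.toNat m hm hn hcr, col_step_B n col.toNat m hm hn hcr]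
    have hnn : colOf m col.toNat ≠ [] := by
      simp only [colOf, ne_eq, List.map_eq_nil_iff]
      intro h
      rw [h] at hm; simp at hm; omega
    have hclen : (colOf m col.toNat).length = n := by simp [colOf, hm]
    have hsorted : bubA (n - 1) (colOf m col.toNat)
        = PySem.List.sorted (colOf m col.toNat) (fun x => x) false := by
      have h := bubA_eq_sorted (colOf m col.toNat) hnn
      rw [hclen] at h
      exact h
    rw [hsorted]
    apply ih (fun col' hcl => hmem col' (by simp [hcl])) _ (by simp [length_wcol, hm])
    intro r hr
    obtain ⟨r0, hr0, hl0⟩ := wcol_row_lengths col.toNat m _ r hr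
    rw [hl0]; exact hK r0 hr0

-- ===== the main theorem =====

theorem bubble_sort_columns_spec : Claim_equal_bubble_sort_columns := by
  intro matrix _ hpre
  obtain ⟨hne, hrows⟩ := hpre
  unfold Spec_bubble_sort_columns bubble_sort_columns bubble_sort_columns_alt
  dsimp only
  have hn : 1 ≤ matrix.length := by
    cases matrix with
    | nil => exact absurd rfl hne
    | cons r rs => simp
  have hhead : PySem.List.pyGetD matrix 0 [] = matrix.headD [] := by
    cases matrix with
    | nil => rfl
    | cons r rs => simp [PySem.List.pyGetD_zero]
  have hK : ∀ r ∈ matrix, (PySem.List.pyGetD matrix 0 []).length ≤ r.length := by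
    intro r hr; rw [hhead]; exact hrows r hr
  exact cols_fold matrix.length (PySem.List.pyGetD matrix 0 []).length hn
    (PySem.List.pyRange 0 ((PySem.List.pyGetD matrix 0 []).length : Int) 1)
    (fun col hcl => by
      have := (PySem.List.mem_pyRange_one).mp hcl
      exact ⟨this.1, this.2⟩)
    matrix rfl hK
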